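-- pv_equiv track=rewrite | github.com/ccctw-ma/leetcode | src/Match/match301-310/307.py | largestPalindromic
-- ===== SOURCE A (Python) =====
-- def largestPalindromic(num: str) -> str:
--     dp = [0] * 10
--     for c in num:
--         dp[ord(c) - ord('0')] += 1
--     middle = ''
--     part = ''
--     for i in range(9, - 1, - 1):
--         if dp[i] % 2 == 1 and len(middle) == 0:
--             middle = str(i)
--         part += str(i) * (dp[i] // 2)
--     if len(part) == 0 and len(middle) == 1:
--         return middle
--     if len(part) > 0 and int(part) == 0 and len(middle) == 1:
--         return middle
--     if len(part) > 0 and int(part) == 0 and len(middle) == 0: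
--         return "0"
--     return part + middle + "".join(reversed(list(part)))
-- ===== SOURCE B (Python) =====
-- def largestPalindromic(num: str) -> str:
--     ds = sorted(map(int, num))[::-1]      # digit values, descending
--     half = []
--     middle = ''
--     i = 0
--     n = len(ds)
--     while i < n:
--         if i + 1 < n and ds[i] == ds[i + 1]:
--             half.append(ds[i])
--             i += 2
--         else:
--             if middle == '':
--                 middle = str(ds[i])
--             i += 1
--     if not half:
--         return middle
--     if half[0] == 0:                      # descending order: the whole half is zeros
--         return middle if middle else '0'
--     left = ''.join(map(str, half))
--     return left + middle + left[::-1]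
-- ===== Notes on version B (the rewrite author's own statement) =====
-- stated objective: alternative
-- what changed: B converts the characters to digit values with map(int,...), sorts them descending and pairs adjacent equal values in a single scan (the first unpaired value becomes the middle), replacing A's 10-bucket count array, its 9-to-0 reconstruction loop and its int(part)==0 test (B checks the first value of the descending half instead).
-- outside the precondition, e.g. on largestPalindromic('&'): A returns '0', B raises ValueError; on largestPalindromic('/'): A returns '9', B raises ValueError; on largestPalindromic('//'): A returns '99', B raises ValueError
import Mathlib
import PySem

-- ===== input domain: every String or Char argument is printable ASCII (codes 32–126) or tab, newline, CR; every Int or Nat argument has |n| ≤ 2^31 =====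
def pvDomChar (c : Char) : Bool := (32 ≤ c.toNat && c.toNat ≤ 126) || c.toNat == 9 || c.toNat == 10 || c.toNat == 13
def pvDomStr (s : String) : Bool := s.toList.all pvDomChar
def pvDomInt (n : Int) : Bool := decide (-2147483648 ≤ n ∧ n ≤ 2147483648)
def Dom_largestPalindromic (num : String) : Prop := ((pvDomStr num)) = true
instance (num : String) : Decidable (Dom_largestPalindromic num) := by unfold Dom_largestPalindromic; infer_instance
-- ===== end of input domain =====

-- B builds the palindrome by converting the characters to digit values, sorting them descending
-- and pairing adjacent equals in one scan, instead of A's 10-bucket count array and its 9..0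
-- reconstruction loop (objective: alternative; same return value on digit strings).

-- ===== PORT A =====
-- dp[i] += 1  (Python list indexing: negative i wraps, out of range raises = none)
def pvIncr? (dp : List Int) (i : Int) : Option (List Int) :=
  match PySem.List.pyGet? dp i with
  | none => none
  | some v => PySem.List.pySet? dp i (v + 1)

-- the counting loop: for c in num: dp[ord(c) - ord('0')] += 1
def pvCount (cs : List Char) : Option (List Int) :=
  cs.foldl (fun acc c => acc.bind (fun dp => pvIncr? dp ((c.toNat : Int) - 48)))
    (some (List.replicate 10 (0 : Int)))

-- int(part): exact hand port, valid because A's `part` consists only of digit characters '0'..'9'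
def pvIntOfDigits (cs : List Char) : Int :=
  cs.foldl (fun a c => a * 10 + ((c.toNat : Int) - 48)) 0

-- the reconstruction loop: for i in range(9, -1, -1): …  (state = (middle, part))
def pvLoopA (dp : List Int) : List Char × List Char :=
  (PySem.List.pyRange 9 (-1) (-1)).foldl
    (fun st i =>
      let m := if PySem.Int.mod (PySem.List.pyGetD dp i 0) 2 = 1 ∧ st.1.length = 0
               then PySem.Int.toChars i else st.1
      (m, st.2 ++ (List.replicate (PySem.Int.floordiv (PySem.List.pyGetD dp i 0) 2).toNat
                    (PySem.Int.toChars i)).flatten))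
    ([], [])

def largestPalindromic (num : String) : String :=
  match pvCount num.toList with
  | none => ""          -- unreachable under Pre_: Python raises IndexError here
  | some dp =>
    let mp := pvLoopA dp
    let middle := mp.1
    let part := mp.2
    if part.length = 0 ∧ middle.length = 1 then String.ofList middle
    else if part.length > 0 ∧ pvIntOfDigits part = 0 ∧ middle.length = 1 then String.ofList middle
    else if part.length > 0 ∧ pvIntOfDigits part = 0 ∧ middle.length = 0 then "0"
    else String.ofList (part ++ middle ++ part.reverse)

-- ===== PORT B =====
-- map(int, num): int(c) per character, left to right (none = ValueError on a non-digit)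
def pvParse : List Char → Option (List Int)
  | [] => some []
  | c :: t =>
    match PySem.Int.ofChars? [c], pvParse t with
    | some v, some vs => some (v :: vs)
    | _, _ => none

-- the while loop of Source B: pair adjacent equal values, first unpaired one becomes the middle
-- (the middle string is kept as its character list, '' = [])
def pvScan (m : List Char) (p : List Int) : List Int → List Char × List Int
  | [] => (m, p)
  | [x] => ((if m = [] then PySem.Int.toChars x else m), p)
  | x :: y :: rest =>
    if x = y then pvScan m (p ++ [x]) rest
    else pvScan (if m = [] then PySem.Int.toChars x else m) p (y :: rest)

def largestPalindromic_alt (num : String) : String :=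
  match pvParse num.toList with
  | none => ""        -- unreachable under Pre_: Python raises ValueError here
  | some vs =>
    let ds := (PySem.List.sorted vs (fun v => v) false).reverse    -- sorted(...)[::-1]
    let mp := pvScan [] [] ds
    let middle := mp.1
    match mp.2 with
    | [] => String.ofList middle
    | h :: t =>
      if h = 0 then (if middle ≠ [] then String.ofList middle else "0")
      else
        let left := ((h :: t).map PySem.Int.toChars).flatten       -- ''.join(map(str, half))
        String.ofList (left ++ middle ++ left.reverse)

-- ===== PRECONDITION & SPEC =====
-- Pre_ excludes strings with any non-digit character: on characters '&'..'/' A's negative index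
-- dp[ord(c)-48] wraps around and silently counts them as digits while B's int() parsing raises
-- ValueError there; on every other non-digit character A itself raises IndexError.
def Pre_largestPalindromic (num : String) : Prop :=
  (num.toList.all (fun c => decide ('0' ≤ c) && decide (c ≤ '9'))) = true
instance (num : String) : Decidable (Pre_largestPalindromic num) := by
  unfold Pre_largestPalindromic; infer_instance

def pvWitness_largestPalindromic : String := "0123398"

def Spec_largestPalindromic (num : String) (out : String) : Prop :=
  out = largestPalindromic_alt num
instance (num : String) (out : String) : Decidable (Spec_largestPalindromic num out) := by
  unfold Spec_largestPalindromic; infer_instance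

-- ===== CLAIM (what is proved, stated in full; the proofs are below) =====
def Claim_equal_largestPalindromic : Prop :=
  ∀ (num : String), Dom_largestPalindromic num → Pre_largestPalindromic num →
    Spec_largestPalindromic num (largestPalindromic num)

-- ===== LEMMAS AND PROOFS =====
theorem pvCharEq {a b : Char} (h : a.toNat = b.toNat) : a = b := by
  apply Char.ext; exact UInt32.toNat_inj.mp h

theorem pvCharLe {a b : Char} : (a ≤ b) ↔ a.toNat ≤ b.toNat := by
  rw [Char.le_def, UInt32.le_iff_toNat_le]; exact Iff.rfl

def pvAsc : List Char := ['0','1','2','3','4','5','6','7','8','9']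
def pvAscI : List Int := [0,1,2,3,4,5,6,7,8,9]
def pvDescI : List Int := [9,8,7,6,5,4,3,2,1,0]

def pvVal (c : Char) : Int := (c.toNat : Int) - 48

def pvMidOfI (k : Int → Nat) : List Int → List Char
  | [] => []
  | i :: t => if k i % 2 = 1 then PySem.Int.toChars i else pvMidOfI k t

theorem pvCount_fold (cs : List Char) : ∀ dp : List Int, dp.length = 10 →
    (∀ c ∈ cs, 48 ≤ c.toNat ∧ c.toNat ≤ 57) →
    ∃ dp', (cs.foldl (fun acc c => acc.bind (fun dp => pvIncr? dp ((c.toNat : Int) - 48))) (some dp))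
             = some dp' ∧ dp'.length = 10 ∧
           ∀ d : Char, 48 ≤ d.toNat → d.toNat ≤ 57 →
             dp'.getD (d.toNat - 48) 0 = dp.getD (d.toNat - 48) 0 + (cs.count d : Int) := by
  induction cs with
  | nil => intro dp hlen _; exact ⟨dp, rfl, hlen, fun d _ _ => by simp⟩
  | cons c t ih =>
    intro dp hlen hdig
    obtain ⟨h1, h2⟩ := hdig c (by simp)
    have hi : ((c.toNat : Int) - 48) = ((c.toNat - 48 : Nat) : Int) := by omega
    have hlt : c.toNat - 48 < dp.length := by omega
    have hstep : pvIncr? dp ((c.toNat : Int) - 48)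
        = some (dp.set (c.toNat - 48) (dp.getD (c.toNat - 48) 0 + 1)) := by
      rw [pvIncr?, hi, PySem.List.pyGet?_natCast]
      rw [List.getElem?_eq_getElem hlt]
      simp only []
      rw [PySem.List.pySet?_natCast dp _ _ hlt]
      rw [List.getD_eq_getElem dp 0 hlt]
    obtain ⟨dp', hfold, hlen', hfin⟩ := ih (dp.set (c.toNat - 48) (dp.getD (c.toNat - 48) 0 + 1))
      (by simp [hlen]) (fun x hx => hdig x (by simp [hx]))
    refine ⟨dp', ?_, hlen', ?_⟩
    · simpa [hstep] using hfold
    · intro d hd1 hd2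
      rw [hfin d hd1 hd2]
      have hcount : (t.count d : Int) + (if d = c then 1 else 0) = ((c :: t).count d : Int) := by
        rw [List.count_cons]; split_ifs <;> simp_all
      by_cases hdc : d = c
      · subst hdc
        rw [List.getD_eq_getElem _ 0 (by simpa [hlen] using hlt), List.getElem_set_self]
        rw [List.getD_eq_getElem dp 0 hlt]
        rw [← hcount]; simp; ring
      · have hne : d.toNat - 48 ≠ c.toNat - 48 := by
          intro h; exact hdc (pvCharEq (by omega))
        have hlt2 : d.toNat - 48 < dp.length := by omega
        rw [List.getD_eq_getElem _ 0 (by simpa [hlen] using hlt2),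
            List.getElem_set_ne (by omega), ← List.getD_eq_getElem dp 0 hlt2]
        rw [← hcount]; simp [hdc]

theorem pvLoopA_fold (dp : List Int) (k : Int → Nat) :
    ∀ (l : List Int) (m p : List Char),
    (∀ i ∈ l, PySem.List.pyGetD dp i 0 = (k i : Int)) →
    (∀ i ∈ l, PySem.Int.toChars i ≠ []) →
    l.foldl
      (fun st i =>
        let m := if PySem.Int.mod (PySem.List.pyGetD dp i 0) 2 = 1 ∧ st.1.length = 0
                 then PySem.Int.toChars i else st.1
        (m, st.2 ++ (List.replicate (PySem.Int.floordiv (PySem.List.pyGetD dp i 0) 2).toNat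
                      (PySem.Int.toChars i)).flatten)) (m, p)
    = ((if m = [] then pvMidOfI k l else m),
       p ++ l.flatMap (fun i => (List.replicate (k i / 2) (PySem.Int.toChars i)).flatten)) := by
  intro l
  induction l with
  | nil => intro m p _ _; simp [pvMidOfI]
  | cons x t ih =>
    intro m p hx hne
    have hget := hx x (by simp)
    have hnex : PySem.Int.toChars x ≠ [] := hne x (by simp)
    have hmod : PySem.Int.mod ((k x : Nat) : Int) 2 = ((k x % 2 : Nat) : Int) := by
      exact_mod_cast PySem.Int.mod_natCast (k x) 2
    have hmiff : (PySem.Int.mod (PySem.List.pyGetD dp x 0) 2 = 1) ↔ k x % 2 = 1 := by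
      rw [hget, hmod]; exact_mod_cast Iff.rfl
    have hdiv : (PySem.Int.floordiv (PySem.List.pyGetD dp x 0) 2).toNat = k x / 2 := by
      rw [hget]
      have : PySem.Int.floordiv ((k x : Nat) : Int) 2 = ((k x / 2 : Nat) : Int) := by
        exact_mod_cast PySem.Int.floordiv_natCast (k x) 2
      rw [this]; exact Int.toNat_natCast _
    have hcond : (PySem.Int.mod (PySem.List.pyGetD dp x 0) 2 = 1 ∧ m.length = 0)
        ↔ (k x % 2 = 1 ∧ m = []) := by
      rw [hmiff, List.length_eq_zero_iff]
    simp only [List.foldl_cons, hdiv]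
    simp only [hcond]
    rw [ih _ _ (fun y hy => hx y (by simp [hy])) (fun y hy => hne y (by simp [hy]))]
    by_cases hm : m = []
    · subst hm
      by_cases hodd : k x % 2 = 1
      · simp [hodd, pvMidOfI, List.append_assoc, hnex]
      · simp [hodd, pvMidOfI, List.append_assoc]
    · simp [hm, List.append_assoc]

theorem pvScan_replicate (c : Int) (rest : List Int) (hr : ∀ x ∈ rest, x ≠ c) :
    ∀ n (m : List Char) (p : List Int),
    pvScan m p (List.replicate n c ++ rest)
      = pvScan (if n % 2 = 1 ∧ m = [] then PySem.Int.toChars c else m)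
          (p ++ List.replicate (n / 2) c) rest := by
  intro n
  induction n using Nat.strong_induction_on with
  | _ n ih =>
    match n with
    | 0 => intro m p; simp
    | 1 =>
      intro m p
      match rest with
      | [] => simp [pvScan]
      | y :: t =>
        have hy : y ≠ c := hr y (by simp)
        simp only [List.replicate, List.singleton_append, pvScan]
        rw [if_neg (by simpa using fun h => (hy h.symm).elim)]
        simp
    | (k + 2) =>
      intro m p
      have h2 : List.replicate (k + 2) c ++ rest = c :: c :: (List.replicate k c ++ rest) := by
        simp [List.replicate_succ]
      rw [h2]
      simp only [pvScan]
      rw [ih k (by omega), if_pos trivial]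
      have hm2 : (k + 2) % 2 = k % 2 := by omega
      have hd2 : (k + 2) / 2 = k / 2 + 1 := by omega
      rw [hm2, hd2]
      congr 1
      rw [List.append_assoc]
      congr 1

theorem pvScan_flatMap (k : Int → Nat) :
    ∀ (ds : List Int), ds.Pairwise (· ≠ ·) → (∀ i ∈ ds, PySem.Int.toChars i ≠ []) →
    ∀ (m : List Char) (p : List Int),
    pvScan m p (ds.flatMap fun c => List.replicate (k c) c)
      = ((if m = [] then pvMidOfI k ds else m),
         p ++ ds.flatMap (fun c => List.replicate (k c / 2) c)) := by
  intro ds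
  induction ds with
  | nil => intro _ _ m p; simp [pvScan, pvMidOfI]
  | cons c t ih =>
    intro hpw hne m p
    have hnec : PySem.Int.toChars c ≠ [] := hne c (by simp)
    have hnc : ∀ x ∈ t.flatMap (fun c => List.replicate (k c) c), x ≠ c := by
      intro x hx
      obtain ⟨d, hd, hxd⟩ := List.mem_flatMap.mp hx
      rw [List.eq_of_mem_replicate hxd]
      exact fun h => ((List.pairwise_cons.mp hpw).1 d hd) h.symm
    rw [List.flatMap_cons, pvScan_replicate c _ hnc,
      ih (List.pairwise_cons.mp hpw).2 (fun y hy => hne y (by simp [hy]))]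
    by_cases hm : m = []
    · subst hm
      by_cases hodd : k c % 2 = 1
      · simp [hodd, pvMidOfI, List.append_assoc, hnec]
      · simp [hodd, pvMidOfI, List.append_assoc]
    · simp [hm, List.append_assoc]

theorem pvEqIff {a b : Char} : a = b ↔ a.toNat = b.toNat := ⟨fun h => by rw [h], pvCharEq⟩

theorem pvMemAsc {a : Char} (h1 : 48 ≤ a.toNat) (h2 : a.toNat ≤ 57) : a ∈ pvAsc := by
  have e0 : ('0' : Char).toNat = 48 := rfl
  have e1 : ('1' : Char).toNat = 49 := rfl
  have e2 : ('2' : Char).toNat = 50 := rfl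
  have e3 : ('3' : Char).toNat = 51 := rfl
  have e4 : ('4' : Char).toNat = 52 := rfl
  have e5 : ('5' : Char).toNat = 53 := rfl
  have e6 : ('6' : Char).toNat = 54 := rfl
  have e7 : ('7' : Char).toNat = 55 := rfl
  have e8 : ('8' : Char).toNat = 56 := rfl
  have e9 : ('9' : Char).toNat = 57 := rfl
  simp only [pvAsc, List.mem_cons, List.not_mem_nil, or_false, pvEqIff,
    e0, e1, e2, e3, e4, e5, e6, e7, e8, e9]
  omega

theorem pvParse_digits (cs : List Char) (h : ∀ c ∈ cs, 48 ≤ c.toNat ∧ c.toNat ≤ 57) :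
    pvParse cs = some (cs.map pvVal) := by
  induction cs with
  | nil => rfl
  | cons c t ih =>
    obtain ⟨h1, h2⟩ := h c (by simp)
    have hc : PySem.Int.ofChars? [c] = some (pvVal c) := by
      have := pvMemAsc h1 h2
      fin_cases this <;> decide
    rw [pvParse, hc, ih (fun x hx => h x (by simp [hx]))]
    rfl

theorem pvValInj : Function.Injective pvVal := by
  intro a b hab
  exact pvCharEq (by unfold pvVal at hab; omega)

theorem pvMemAscI {a : Int} (h1 : 0 ≤ a) (h2 : a ≤ 9) : a ∈ pvAscI := by
  simp only [pvAscI, List.mem_cons, List.not_mem_nil, or_false]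
  omega

theorem pvPermAscI (vs : List Int) (h : ∀ v ∈ vs, 0 ≤ v ∧ v ≤ 9) :
    (pvAscI.flatMap fun i => List.replicate (vs.count i) i).Perm vs := by
  apply List.perm_iff_count.mpr
  intro a
  by_cases ha : 0 ≤ a ∧ a ≤ 9
  · have hmem := pvMemAscI ha.1 ha.2
    fin_cases hmem <;> simp [pvAscI, List.count_append, List.count_replicate]
  · have hnot : a ∉ vs := fun hmem => ha (h a hmem)
    rw [List.count_eq_zero_of_not_mem hnot]
    simp only [pvAscI, List.flatMap_cons, List.flatMap_nil, List.count_append,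
      List.count_replicate, List.count_nil]
    have n0 : ¬((0 : Int) == a) = true := by simpa using fun e => ha (by omega)
    have n1 : ¬((1 : Int) == a) = true := by simpa using fun e => ha (by omega)
    have n2 : ¬((2 : Int) == a) = true := by simpa using fun e => ha (by omega)
    have n3 : ¬((3 : Int) == a) = true := by simpa using fun e => ha (by omega)
    have n4 : ¬((4 : Int) == a) = true := by simpa using fun e => ha (by omega)
    have n5 : ¬((5 : Int) == a) = true := by simpa using fun e => ha (by omega)
    have n6 : ¬((6 : Int) == a) = true := by simpa using fun e => ha (by omega)
    have n7 : ¬((7 : Int) == a) = true := by simpa using fun e => ha (by omega)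
    have n8 : ¬((8 : Int) == a) = true := by simpa using fun e => ha (by omega)
    have n9 : ¬((9 : Int) == a) = true := by simpa using fun e => ha (by omega)
    simp [n0, n1, n2, n3, n4, n5, n6, n7, n8, n9]

theorem pvPairwiseFlatMap {α : Type} {R : α → α → Prop} (k : α → Nat) :
    ∀ ds : List α, (∀ c ∈ ds, R c c) → ds.Pairwise R →
      (ds.flatMap fun c => List.replicate (k c) c).Pairwise R := by
  intro ds
  induction ds with
  | nil => simp
  | cons c t ih =>
    intro hrefl hpw
    rw [List.flatMap_cons]
    apply List.pairwise_append.mpr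
    refine ⟨?_, ih (fun d hd => hrefl d (by simp [hd])) (List.pairwise_cons.mp hpw).2, ?_⟩
    · exact List.pairwise_replicate.mpr (Or.inr (hrefl c (by simp)))
    · intro x hx y hy
      rw [List.eq_of_mem_replicate hx]
      obtain ⟨d, hd, hyd⟩ := List.mem_flatMap.mp hy
      rw [List.eq_of_mem_replicate hyd]
      exact (List.pairwise_cons.mp hpw).1 d hd

theorem pvSortedAscI (vs : List Int) (h : ∀ v ∈ vs, 0 ≤ v ∧ v ≤ 9) :
    PySem.List.sorted vs (fun v => v) false
      = pvAscI.flatMap (fun i => List.replicate (vs.count i) i) := by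
  apply PySem.List.sorted_id_eq_of_perm_of_pairwise
  · exact pvPermAscI vs h
  · exact pvPairwiseFlatMap _ pvAscI (fun c _ => le_refl c) (by decide)

theorem pvRevFlatMapI (k : Int → Nat) :
    (pvAscI.flatMap fun i => List.replicate (k i) i).reverse
      = pvDescI.flatMap (fun i => List.replicate (k i) i) := by
  simp [pvAscI, pvDescI, List.reverse_append]

theorem pvVal_zero (cs : List Char) : ∀ a : Int, 0 ≤ a →
    (∀ c ∈ cs, 48 ≤ c.toNat ∧ c.toNat ≤ 57) →
    (cs.foldl (fun a c => a * 10 + ((c.toNat : Int) - 48)) a = 0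
      ↔ a = 0 ∧ ∀ c ∈ cs, c = '0') := by
  induction cs with
  | nil => intro a _ _; simp
  | cons c t ih =>
    intro a ha hdig
    obtain ⟨h1, h2⟩ := hdig c (by simp)
    have hd0 : (0 : Int) ≤ (c.toNat : Int) - 48 := by omega
    have hstep : (0 : Int) ≤ a * 10 + ((c.toNat : Int) - 48) := by nlinarith
    rw [List.foldl_cons, ih _ hstep (fun x hx => hdig x (by simp [hx]))]
    constructor
    · rintro ⟨hz, hall⟩
      have haz : a = 0 ∧ (c.toNat : Int) - 48 = 0 := by constructor <;> nlinarith
      have hc : c = '0' := pvCharEq (by have := haz.2; have e : ('0':Char).toNat = 48 := rfl; omega)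
      refine ⟨haz.1, fun x hx => ?_⟩
      rcases List.mem_cons.mp hx with h | h
      · rw [h]; exact hc
      · exact hall x h
    · rintro ⟨hz, hall⟩
      have hc : c = '0' := hall c (by simp)
      have : c.toNat = 48 := by rw [hc]; rfl
      exact ⟨by rw [hz, this]; ring, fun x hx => hall x (by simp [hx])⟩

theorem pvMidOfI_cases (k : Int → Nat) (ds : List Int) :
    pvMidOfI k ds = [] ∨ ∃ i ∈ ds, pvMidOfI k ds = PySem.Int.toChars i := by
  induction ds with
  | nil => left; rfl
  | cons c t ih =>
    by_cases h : k c % 2 = 1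
    · right; exact ⟨c, by simp, by simp [pvMidOfI, h]⟩
    · rcases ih with h' | ⟨x, hx, h'⟩
      · left; simp [pvMidOfI, h, h']
      · right; exact ⟨x, by simp [hx], by simp [pvMidOfI, h, h']⟩

theorem pvToChars_digit {v : Int} (h0 : 0 ≤ v) (h9 : v ≤ 9) :
    ∃ c, PySem.Int.toChars v = [c] ∧ 48 ≤ c.toNat ∧ c.toNat ≤ 57 ∧ (c = '0' ↔ v = 0) := by
  have hv : v = 0 ∨ v = 1 ∨ v = 2 ∨ v = 3 ∨ v = 4 ∨ v = 5 ∨ v = 6 ∨ v = 7 ∨ v = 8 ∨ v = 9 := by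
    omega
  rcases hv with rfl | rfl | rfl | rfl | rfl | rfl | rfl | rfl | rfl | rfl
  · exact ⟨'0', by decide, by decide, by decide, by decide⟩
  · exact ⟨'1', by decide, by decide, by decide, by decide⟩
  · exact ⟨'2', by decide, by decide, by decide, by decide⟩
  · exact ⟨'3', by decide, by decide, by decide, by decide⟩
  · exact ⟨'4', by decide, by decide, by decide, by decide⟩
  · exact ⟨'5', by decide, by decide, by decide, by decide⟩
  · exact ⟨'6', by decide, by decide, by decide, by decide⟩
  · exact ⟨'7', by decide, by decide, by decide, by decide⟩
  · exact ⟨'8', by decide, by decide, by decide, by decide⟩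
  · exact ⟨'9', by decide, by decide, by decide, by decide⟩

theorem pvFlattenMapToChars (l : List Int) (k : Int → Nat) :
    ((l.flatMap fun i => List.replicate (k i) i).map PySem.Int.toChars).flatten
      = l.flatMap (fun i => (List.replicate (k i) (PySem.Int.toChars i)).flatten) := by
  induction l with
  | nil => rfl
  | cons c t ih =>
    simp only [List.flatMap_cons, List.map_append, List.flatten_append, ih, List.map_replicate]

-- the common if/match tail, compared at the level of the half as digit values
theorem pvTailI (mid : List Char) (halfI : List Int)
    (hm : mid = [] ∨ ∃ c, mid = [c])
    (hdig : ∀ v ∈ halfI, 0 ≤ v ∧ v ≤ 9)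
    (hdesc : halfI.Pairwise (fun a b => b ≤ a)) :
    (if ((halfI.map PySem.Int.toChars).flatten).length = 0 ∧ mid.length = 1 then String.ofList mid
     else if ((halfI.map PySem.Int.toChars).flatten).length > 0 ∧
              pvIntOfDigits ((halfI.map PySem.Int.toChars).flatten) = 0 ∧ mid.length = 1 then
       String.ofList mid
     else if ((halfI.map PySem.Int.toChars).flatten).length > 0 ∧
              pvIntOfDigits ((halfI.map PySem.Int.toChars).flatten) = 0 ∧ mid.length = 0 then "0"
     else String.ofList ((halfI.map PySem.Int.toChars).flatten ++ mid
            ++ ((halfI.map PySem.Int.toChars).flatten).reverse))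
    = (match halfI with
       | [] => String.ofList mid
       | h :: t =>
         if h = 0 then (if mid ≠ [] then String.ofList mid else "0")
         else String.ofList ((((h :: t).map PySem.Int.toChars).flatten) ++ mid
                ++ (((h :: t).map PySem.Int.toChars).flatten).reverse)) := by
  have hchars : ∀ c ∈ (halfI.map PySem.Int.toChars).flatten, 48 ≤ c.toNat ∧ c.toNat ≤ 57 := by
    intro c hc
    obtain ⟨l, hl, hcl⟩ := List.mem_flatten.mp hc
    obtain ⟨v, hv, hvl⟩ := List.mem_map.mp hl
    obtain ⟨c', hc', hb1, hb2, _⟩ := pvToChars_digit (hdig v hv).1 (hdig v hv).2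
    rw [← hvl, hc'] at hcl
    simp at hcl
    rw [hcl]; exact ⟨hb1, hb2⟩
  match halfI, hdig, hdesc with
  | [], _, _ =>
    rcases hm with h | ⟨c, h⟩ <;> subst h <;> simp
  | h :: t, hdig, hdesc =>
    obtain ⟨hc, hcEq, hb1, hb2, hc0⟩ := pvToChars_digit (hdig h (by simp)).1 (hdig h (by simp)).2
    have hne : ((h :: t).map PySem.Int.toChars).flatten = hc :: (t.map PySem.Int.toChars).flatten := by
      simp [hcEq]
    by_cases h0 : h = 0
    · subst h0
      have hall : ∀ c ∈ ((0 :: t).map PySem.Int.toChars).flatten, c = '0' := by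
        intro c hcm
        obtain ⟨l, hl, hcl⟩ := List.mem_flatten.mp hcm
        obtain ⟨v, hv, hvl⟩ := List.mem_map.mp hl
        have hv0 : v = 0 := by
          rcases List.mem_cons.mp hv with rfl | hvt
          · rfl
          · have := (List.pairwise_cons.mp hdesc).1 v hvt
            have := (hdig v hv).1
            omega
        subst hv0
        rw [← hvl, show PySem.Int.toChars 0 = ['0'] from by decide] at hcl
        simpa using hcl
      have hval : pvIntOfDigits (((0 :: t).map PySem.Int.toChars).flatten) = 0 :=
        (pvVal_zero _ 0 le_rfl hchars).mpr ⟨rfl, hall⟩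
      have hc' : hc = '0' := hc0.mpr rfl
      subst hc'
      rcases hm with hmid | ⟨c, hmid⟩ <;> subst hmid <;> rw [hne] at hval ⊢ <;>
        simp [hval]
    · have hcne : hc ≠ '0' := fun e => h0 (hc0.mp e)
      have hval : pvIntOfDigits (((h :: t).map PySem.Int.toChars).flatten) ≠ 0 := by
        intro hz
        have := (pvVal_zero _ 0 le_rfl hchars).mp hz
        exact hcne (this.2 hc (by rw [hne]; simp))
      rcases hm with hmid | ⟨c, hmid⟩ <;> subst hmid <;> rw [hne] at hval ⊢ <;>
        simp [h0, hval, hcEq]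

theorem pvMain (num : String) (h : ∀ c ∈ num.toList, 48 ≤ c.toNat ∧ c.toNat ≤ 57) :
    largestPalindromic num = largestPalindromic_alt num := by
  obtain ⟨dp, hfold, hlen, hget⟩ := pvCount_fold num.toList (List.replicate 10 0) (by simp) h
  have hcount : pvCount num.toList = some dp := hfold
  have hget' : ∀ (j : Nat) (c : Char), c.toNat = 48 + j → j < 10 →
      dp.getD j 0 = (num.toList.count c : Int) := by
    intro j c hc hj
    have := hget c (by omega) (by omega)
    rw [hc] at this
    interval_cases j <;> simpa using this
  have hvb : ∀ v ∈ num.toList.map pvVal, 0 ≤ v ∧ v ≤ 9 := by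
    intro v hv
    obtain ⟨c, hc, hvc⟩ := List.mem_map.mp hv
    have := h c hc
    unfold pvVal at hvc
    omega
  have hkc : ∀ (j : Nat) (c : Char), c.toNat = 48 + j → j < 10 →
      (num.toList.map pvVal).count ((j : Nat) : Int) = num.toList.count c := by
    intro j c hc hj
    have : ((j : Nat) : Int) = pvVal c := by unfold pvVal; omega
    rw [this]
    exact List.count_map_of_injective _ pvVal pvValInj c
  have hx : ∀ i ∈ pvDescI, PySem.List.pyGetD dp i 0 = (((num.toList.map pvVal).count i : Nat) : Int) := by
    intro i hi
    fin_cases hi <;> rw [PySem.List.pyGetD_ofNat'] <;>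
      first
        | (rw [show ((9:Int)) = ((9:Nat):Int) from rfl, hkc 9 '9' (by decide) (by omega)]
           exact hget' 9 '9' (by decide) (by omega))
        | (rw [show ((8:Int)) = ((8:Nat):Int) from rfl, hkc 8 '8' (by decide) (by omega)]
           exact hget' 8 '8' (by decide) (by omega))
        | (rw [show ((7:Int)) = ((7:Nat):Int) from rfl, hkc 7 '7' (by decide) (by omega)]
           exact hget' 7 '7' (by decide) (by omega))
        | (rw [show ((6:Int)) = ((6:Nat):Int) from rfl, hkc 6 '6' (by decide) (by omega)]
           exact hget' 6 '6' (by decide) (by omega))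
        | (rw [show ((5:Int)) = ((5:Nat):Int) from rfl, hkc 5 '5' (by decide) (by omega)]
           exact hget' 5 '5' (by decide) (by omega))
        | (rw [show ((4:Int)) = ((4:Nat):Int) from rfl, hkc 4 '4' (by decide) (by omega)]
           exact hget' 4 '4' (by decide) (by omega))
        | (rw [show ((3:Int)) = ((3:Nat):Int) from rfl, hkc 3 '3' (by decide) (by omega)]
           exact hget' 3 '3' (by decide) (by omega))
        | (rw [show ((2:Int)) = ((2:Nat):Int) from rfl, hkc 2 '2' (by decide) (by omega)]
           exact hget' 2 '2' (by decide) (by omega))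
        | (rw [show ((1:Int)) = ((1:Nat):Int) from rfl, hkc 1 '1' (by decide) (by omega)]
           exact hget' 1 '1' (by decide) (by omega))
        | (rw [show ((0:Int)) = ((0:Nat):Int) from rfl, hkc 0 '0' (by decide) (by omega)]
           exact hget' 0 '0' (by decide) (by omega))
  have hrange : PySem.List.pyRange 9 (-1) (-1) = pvDescI := by decide
  have hA := pvLoopA_fold dp (fun i => (num.toList.map pvVal).count i) pvDescI [] [] hx (by decide)
  have hmidA : pvLoopA dp = (pvMidOfI (fun i => (num.toList.map pvVal).count i) pvDescI,
      pvDescI.flatMap fun i =>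
        (List.replicate ((num.toList.map pvVal).count i / 2) (PySem.Int.toChars i)).flatten) := by
    rw [pvLoopA, hrange, hA]
    simp
  -- B side
  have hparse : pvParse num.toList = some (num.toList.map pvVal) := pvParse_digits num.toList h
  have hsorted := pvSortedAscI (num.toList.map pvVal) hvb
  have hrev : (PySem.List.sorted (num.toList.map pvVal) (fun v => v) false).reverse
      = pvDescI.flatMap (fun i => List.replicate ((num.toList.map pvVal).count i) i) := by
    rw [hsorted, pvRevFlatMapI]
  have hscan := pvScan_flatMap (fun i => (num.toList.map pvVal).count i) pvDescI (by decide) (by decide) [] []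
  set halfI := pvDescI.flatMap
      (fun i => List.replicate ((num.toList.map pvVal).count i / 2) i) with hhalfI
  have hpartA : (pvDescI.flatMap fun i =>
        (List.replicate ((num.toList.map pvVal).count i / 2) (PySem.Int.toChars i)).flatten)
      = (halfI.map PySem.Int.toChars).flatten := by
    rw [hhalfI, pvFlattenMapToChars]
  -- assemble
  rw [largestPalindromic, hcount]
  rw [largestPalindromic_alt, hparse]
  simp only [hmidA, hrev, hscan, List.nil_append, hpartA]
  have hdigI : ∀ v ∈ halfI, 0 ≤ v ∧ v ≤ 9 := by
    intro v hv
    obtain ⟨d, hd, hvd⟩ := List.mem_flatMap.mp hv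
    rw [List.eq_of_mem_replicate hvd]
    fin_cases hd <;> exact ⟨by decide, by decide⟩
  have hm : pvMidOfI (fun i => (num.toList.map pvVal).count i) pvDescI = []
      ∨ ∃ c, pvMidOfI (fun i => (num.toList.map pvVal).count i) pvDescI = [c] := by
    rcases pvMidOfI_cases (fun i => (num.toList.map pvVal).count i) pvDescI with h' | ⟨i, hi, h'⟩
    · exact Or.inl h'
    · right
      fin_cases hi <;> exact ⟨_, h'⟩
  have hdescI : halfI.Pairwise (fun a b => b ≤ a) := by
    exact pvPairwiseFlatMap _ pvDescI (fun c _ => le_refl c) (by decide)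
  exact pvTailI _ halfI hm hdigI hdescI

-- ===== VERDICT (by name: the statement is the Claim_ definition above) =====
theorem largestPalindromic_spec : Claim_equal_largestPalindromic := by
  intro num _ hpre
  apply pvMain
  intro c hc
  have hb' := List.all_eq_true.mp hpre c hc
  have hb : '0' ≤ c ∧ c ≤ '9' := by simpa using hb'
  rw [pvCharLe, pvCharLe] at hb
  have e1 : ('0' : Char).toNat = 48 := rfl
  have e2 : ('9' : Char).toNat = 57 := rfl
  rw [e1, e2] at hb
  exact hb
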